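-- pv_equiv track=rewrite | github.com/janezd/predavanja | pef/domace-naloge/2020/04 osumljanje/resitev.py | osumljenci
-- ===== SOURCE A (Python) =====
-- def dejavnosti_osebe(oseba, obiski):
--     vse_dejavnosti = set()
--     for oseba1, dejavnost in obiski:
--         if oseba1 == oseba:
--             vse_dejavnosti.add(dejavnost)
--     return vse_dejavnosti
--
-- def v_stiku(oseba1, oseba2, obiski):
--     skupne = dejavnosti_osebe(oseba1, obiski) & dejavnosti_osebe(oseba2, obiski)
--     return len(skupne) != 0
--
-- def osumljenci(osebe, zdravi, obiski):
--     v_stiku_z_zdravimi = set()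
--     for oseba in zdravi:
--         for osumljenec in osebe:
--             if v_stiku(osumljenec, oseba, obiski):
--                 v_stiku_z_zdravimi.add(osumljenec)
--     osebe -= v_stiku_z_zdravimi
--     return osebe
-- ===== SOURCE B (Python) =====
-- def osumljenci(osebe, zdravi, obiski):
--     # One pass to collect activities visited by any healthy person,
--     # one pass to collect everyone who visited such an activity,
--     # then a single set difference. (Does not mutate `osebe`; A does,
--     # but the return value is the same set.)
--     zdrave_dejavnosti = {d for o, d in obiski if o in zdravi}
--     v_stiku_z_zdravimi = {o for o, d in obiski if d in zdrave_dejavnosti}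
--     return osebe - v_stiku_z_zdravimi
-- ===== Notes on version B (the rewrite author's own statement) =====
-- stated objective: faster
-- what changed: Replaces the triple loop (every healthy x every suspect x scan of all visits twice per pair) by two linear passes over the visit list -- first the set of activities visited by a healthy person, then the set of people who visited any such activity -- followed by one set difference.
import Mathlib
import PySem

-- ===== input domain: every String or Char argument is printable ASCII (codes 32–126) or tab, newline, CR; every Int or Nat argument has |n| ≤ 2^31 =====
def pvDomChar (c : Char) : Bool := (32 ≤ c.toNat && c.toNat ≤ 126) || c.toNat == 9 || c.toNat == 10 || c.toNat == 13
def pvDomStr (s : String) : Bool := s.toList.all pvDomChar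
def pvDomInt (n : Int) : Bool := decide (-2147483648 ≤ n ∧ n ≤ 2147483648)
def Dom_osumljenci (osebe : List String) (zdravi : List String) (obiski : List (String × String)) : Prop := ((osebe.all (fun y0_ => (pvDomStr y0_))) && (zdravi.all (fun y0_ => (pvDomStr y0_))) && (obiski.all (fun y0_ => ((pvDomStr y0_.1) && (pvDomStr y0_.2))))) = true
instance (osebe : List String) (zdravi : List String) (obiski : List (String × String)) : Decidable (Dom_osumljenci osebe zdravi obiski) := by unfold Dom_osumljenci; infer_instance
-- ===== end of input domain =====

-- B replaces A's triple nested loop with two linear passes over the visit list plus one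
-- set difference (asymptotically faster); return values agree, but A also mutates the
-- Python set `osebe` in place while B does not — the equivalence is about the return value.


-- ===== PORT A =====
def dejavnosti_osebe (oseba : String) (obiski : List (String × String)) : PySem.Set String :=
  obiski.foldl (fun vse od => if od.1 == oseba then PySem.Set.add vse od.2 else vse) PySem.Set.empty

def v_stiku (oseba1 oseba2 : String) (obiski : List (String × String)) : Bool :=
  PySem.Set.len (PySem.Set.inter (dejavnosti_osebe oseba1 obiski) (dejavnosti_osebe oseba2 obiski)) != 0

def osumljenci (osebe : List String) (zdravi : List String) (obiski : List (String × String)) : List String :=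
  let v_stiku_z_zdravimi :=
    zdravi.foldl (fun acc oseba =>
      osebe.foldl (fun acc2 osumljenec =>
        if v_stiku osumljenec oseba obiski then PySem.Set.add acc2 osumljenec else acc2) acc)
      PySem.Set.empty
  PySem.Set.diff osebe v_stiku_z_zdravimi

-- ===== PORT B =====
def osumljenci_alt (osebe : List String) (zdravi : List String) (obiski : List (String × String)) : List String :=
  let zdrave_dejavnosti :=
    obiski.foldl (fun s od => if zdravi.contains od.1 then PySem.Set.add s od.2 else s) PySem.Set.empty
  let v_stiku_z_zdravimi :=
    obiski.foldl (fun s od => if PySem.Set.contains zdrave_dejavnosti od.2 then PySem.Set.add s od.1 else s) PySem.Set.empty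
  PySem.Set.diff osebe v_stiku_z_zdravimi

-- ===== PRECONDITION & SPEC =====
def Spec_osumljenci (osebe : List String) (zdravi : List String) (obiski : List (String × String)) (out : List String) : Prop := out = osumljenci_alt osebe zdravi obiski
instance (osebe : List String) (zdravi : List String) (obiski : List (String × String)) (out : List String) : Decidable (Spec_osumljenci osebe zdravi obiski out) := by unfold Spec_osumljenci; infer_instance

-- ===== CLAIM (what is proved, stated in full; the proofs are below) =====
def Claim_equal_osumljenci : Prop := ∀ (osebe : List String) (zdravi : List String) (obiski : List (String × String)), Dom_osumljenci osebe zdravi obiski → Spec_osumljenci osebe zdravi obiski (osumljenci osebe zdravi obiski)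

-- ===== LEMMAS AND PROOFS =====

-- membership in a 'for e in l: if p(e): s.add(f(e))' loop
theorem mem_foldl_condAdd {α β : Type} [BEq α] [LawfulBEq α] (p : β → Bool) (f : β → α)
    (l : List β) (acc : PySem.Set α) (x : α) :
    x ∈ l.foldl (fun s e => if p e then PySem.Set.add s (f e) else s) acc
      ↔ x ∈ acc ∨ ∃ e ∈ l, p e = true ∧ f e = x := by
  induction l generalizing acc with
  | nil => simp
  | cons h t ih =>
    cases hp : p h <;>
      (simp [List.foldl_cons, hp, ih, PySem.Set.mem_add]; try tauto)

theorem mem_dejavnosti (o d : String) (obiski : List (String × String)) :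
    d ∈ dejavnosti_osebe o obiski ↔ (o, d) ∈ obiski := by
  unfold dejavnosti_osebe
  rw [mem_foldl_condAdd (p := fun e => e.1 == o) (f := Prod.snd)]
  constructor
  · rintro (h | ⟨⟨a, b⟩, he, hb, rfl⟩)
    · simp [PySem.Set.empty] at h
    · simp only [beq_iff_eq] at hb; subst hb; exact he
  · intro h; exact Or.inr ⟨(o, d), h, by simp, rfl⟩

theorem v_stiku_iff (o1 o2 : String) (obiski : List (String × String)) :
    v_stiku o1 o2 obiski = true ↔ ∃ d, (o1, d) ∈ obiski ∧ (o2, d) ∈ obiski := by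
  unfold v_stiku PySem.Set.len PySem.Set.inter
  rw [bne_iff_ne]
  simp only [ne_eq, Nat.cast_eq_zero, List.length_eq_zero_iff, List.filter_eq_nil_iff, not_forall]
  push Not
  constructor
  · rintro ⟨d, hd, hq⟩
    exact ⟨d, (mem_dejavnosti _ _ _).mp hd,
      (mem_dejavnosti _ _ _).mp ((PySem.Set.contains_iff _ _).mp (by simpa using hq))⟩
  · rintro ⟨d, h1, h2⟩
    exact ⟨d, (mem_dejavnosti _ _ _).mpr h1,
      by simpa using (PySem.Set.contains_iff _ _).mpr ((mem_dejavnosti _ _ _).mpr h2)⟩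

-- membership in A's nested accumulation loop
theorem mem_stiki (osebe zdravi : List String) (obiski : List (String × String))
    (acc : PySem.Set String) (x : String) :
    x ∈ zdravi.foldl (fun acc oseba =>
        osebe.foldl (fun acc2 osumljenec =>
          if v_stiku osumljenec oseba obiski then PySem.Set.add acc2 osumljenec else acc2) acc)
        acc
      ↔ x ∈ acc ∨ ∃ h ∈ zdravi, ∃ o ∈ osebe, v_stiku o h obiski = true ∧ o = x := by
  induction zdravi generalizing acc with
  | nil => simp
  | cons z t ih =>
    rw [List.foldl_cons, ih,
      mem_foldl_condAdd (p := fun os => v_stiku os z obiski) (f := fun os => os)]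
    constructor
    · rintro ((h | ⟨o, ho, hv, rfl⟩) | ⟨h, ht, o, ho, hv, rfl⟩)
      · exact Or.inl h
      · exact Or.inr ⟨z, by simp, o, ho, hv, rfl⟩
      · exact Or.inr ⟨h, by simp [ht], o, ho, hv, rfl⟩
    · rintro (h | ⟨h, hh, o, ho, hv, rfl⟩)
      · exact Or.inl (Or.inl h)
      · rcases List.mem_cons.mp hh with rfl | ht
        · exact Or.inl (Or.inr ⟨o, ho, hv, rfl⟩)
        · exact Or.inr ⟨h, ht, o, ho, hv, rfl⟩

-- ===== VERDICT (by name: the statement is the Claim_ definition above) =====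
theorem osumljenci_spec : Claim_equal_osumljenci := by
  unfold Claim_equal_osumljenci Spec_osumljenci
  intro osebe zdravi obiski _
  unfold osumljenci osumljenci_alt
  simp only [PySem.Set.diff]
  apply List.filter_congr
  intro x hx
  have hiff :
      (x ∈ zdravi.foldl (fun acc oseba =>
          osebe.foldl (fun acc2 osumljenec =>
            if v_stiku osumljenec oseba obiski then PySem.Set.add acc2 osumljenec else acc2) acc)
          PySem.Set.empty)
        ↔ (x ∈ obiski.foldl (fun s od =>
            if PySem.Set.contains
                (obiski.foldl (fun s od => if zdravi.contains od.1 then PySem.Set.add s od.2 else s)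
                  PySem.Set.empty) od.2
              then PySem.Set.add s od.1 else s) PySem.Set.empty) := by
    rw [mem_stiki,
      mem_foldl_condAdd (p := fun od => PySem.Set.contains
        (obiski.foldl (fun s od => if zdravi.contains od.1 then PySem.Set.add s od.2 else s)
          PySem.Set.empty) od.2) (f := Prod.fst)]
    constructor
    · rintro (h | ⟨h, hh, o, _, hv, rfl⟩)
      · simp [PySem.Set.empty] at h
      · obtain ⟨d, hod, hhd⟩ := (v_stiku_iff _ _ _).mp hv
        refine Or.inr ⟨(o, d), hod, ?_, rfl⟩
        rw [PySem.Set.contains_iff,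
          mem_foldl_condAdd (p := fun od => zdravi.contains od.1) (f := Prod.snd)]
        exact Or.inr ⟨(h, d), hhd, by simpa using hh, rfl⟩
    · rintro (h | ⟨⟨o, d⟩, hod, hc, rfl⟩)
      · simp [PySem.Set.empty] at h
      · rw [PySem.Set.contains_iff,
          mem_foldl_condAdd (p := fun od => zdravi.contains od.1) (f := Prod.snd)] at hc
        rcases hc with h | ⟨⟨h, d'⟩, hhd, hz, hd'⟩
        · simp [PySem.Set.empty] at h
        · refine Or.inr ⟨h, by simpa using hz, o, hx, (v_stiku_iff _ _ _).mpr ⟨d, hod, ?_⟩, rfl⟩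
          simp only at hd'; subst hd'; exact hhd
  have hc :
      PySem.Set.contains (zdravi.foldl (fun acc oseba =>
          osebe.foldl (fun acc2 osumljenec =>
            if v_stiku osumljenec oseba obiski then PySem.Set.add acc2 osumljenec else acc2) acc)
          PySem.Set.empty) x
        = PySem.Set.contains (obiski.foldl (fun s od =>
            if PySem.Set.contains
                (obiski.foldl (fun s od => if zdravi.contains od.1 then PySem.Set.add s od.2 else s)
                  PySem.Set.empty) od.2
              then PySem.Set.add s od.1 else s) PySem.Set.empty) x := by
    rw [Bool.eq_iff_iff, PySem.Set.contains_iff, PySem.Set.contains_iff]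
    exact hiff
  rw [hc]
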